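-- pv_equiv track=rewrite | github.com/segunak/charlotte-third-places | azure-function/airtable_client.py | get_parking_status
-- ===== SOURCE A (Python) =====
-- def get_parking_status(place_details_response):
--     """
--     Determines the parking status of a place based on available parking options.
--
--     Args:
--         place_details_response (dict): The dictionary containing details about the place, including parking options.
--
--     Returns:
--         str: "Free" if any free parking options are available,
--              "Paid" if only paid or valet parking options are available,
--              "Unsure" if no parking information is available or if the options don't fit into the above categories.
--
--     Reference: https://developers.google.com/maps/documentation/places/web-service/reference/rest/v1/places#parkingoptions
--     """
--     parking_options = place_details_response.get('parkingOptions', {})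
--
--     # Check for free parking availability
--     free_parking_keys = ["freeParkingLot",
--                          "freeStreetParking", "freeGarageParking"]
--     if any(parking_options.get(key, False) for key in free_parking_keys):
--         return "Free"
--
--     # Check for paid parking availability
--     paid_parking_keys = [
--         "paidParkingLot", "paidStreetParking", "paidGarageParking", "valetParking"]
--     if any(parking_options.get(key, False) for key in paid_parking_keys):
--         return "Paid"
--
--     return "Unsure"
-- ===== SOURCE B (Python) =====
-- def get_parking_status(place_details_response):
--     free_keys = {"freeParkingLot", "freeStreetParking", "freeGarageParking"}
--     paid_keys = {"paidParkingLot", "paidStreetParking", "paidGarageParking", "valetParking"}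
--     has_free = False
--     has_paid = False
--     for key, value in place_details_response.get('parkingOptions', {}).items():
--         if value and key in free_keys:
--             has_free = True
--         elif value and key in paid_keys:
--             has_paid = True
--     if has_free:
--         return "Free"
--     if has_paid:
--         return "Paid"
--     return "Unsure"
-- ===== Notes on version B (the rewrite author's own statement) =====
-- stated objective: alternative
-- what changed: Replaces A's two ordered any-scans over fixed key lists (each doing a dict lookup per key) with a single pass over the actual parkingOptions items maintaining has_free/has_paid flags, deciding the result after the pass.
import Mathlib
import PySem

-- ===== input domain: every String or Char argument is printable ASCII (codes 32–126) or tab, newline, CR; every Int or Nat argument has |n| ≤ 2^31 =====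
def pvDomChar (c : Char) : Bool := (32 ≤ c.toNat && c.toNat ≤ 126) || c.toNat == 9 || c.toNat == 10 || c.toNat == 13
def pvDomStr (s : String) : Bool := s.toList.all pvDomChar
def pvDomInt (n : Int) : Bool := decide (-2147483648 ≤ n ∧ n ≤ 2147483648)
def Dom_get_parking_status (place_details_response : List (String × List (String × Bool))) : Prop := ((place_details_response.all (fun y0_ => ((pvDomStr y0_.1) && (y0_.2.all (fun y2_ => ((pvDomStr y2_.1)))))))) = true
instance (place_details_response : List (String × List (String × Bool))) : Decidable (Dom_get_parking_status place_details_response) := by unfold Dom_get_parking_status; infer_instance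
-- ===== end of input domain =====

-- B replaces A's two ordered any-scans over fixed key lists with one pass over the
-- parkingOptions items maintaining has_free/has_paid flags (alternative decomposition).

-- ===== PORT A =====
def get_parking_status (place_details_response : List (String × List (String × Bool))) : String :=
  let parking_options :=
    PySem.Dict.getD (PySem.Dict.mk place_details_response) "parkingOptions" ([] : List (String × Bool))
  let free_parking_keys := ["freeParkingLot", "freeStreetParking", "freeGarageParking"]
  if free_parking_keys.any (fun key => PySem.Dict.getD (PySem.Dict.mk parking_options) key false) then
    "Free"
  else
    let paid_parking_keys := ["paidParkingLot", "paidStreetParking", "paidGarageParking", "valetParking"]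
    if paid_parking_keys.any (fun key => PySem.Dict.getD (PySem.Dict.mk parking_options) key false) then
      "Paid"
    else
      "Unsure"

-- ===== PORT B =====
def get_parking_status_alt (place_details_response : List (String × List (String × Bool))) : String :=
  let free_keys : PySem.Set String := PySem.Set.ofList ["freeParkingLot", "freeStreetParking", "freeGarageParking"]
  let paid_keys : PySem.Set String := PySem.Set.ofList ["paidParkingLot", "paidStreetParking", "paidGarageParking", "valetParking"]
  let st :=
    (PySem.Dict.getD (PySem.Dict.mk place_details_response) "parkingOptions" ([] : List (String × Bool))).foldl
      (fun (st : Bool × Bool) kv =>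
        if kv.2 && free_keys.contains kv.1 then (true, st.2)
        else if kv.2 && paid_keys.contains kv.1 then (st.1, true)
        else st)
      (false, false)
  if st.1 then "Free" else if st.2 then "Paid" else "Unsure"

-- ===== PRECONDITION & SPEC =====
-- Pre_ excludes association lists whose inner (parking-options) lists carry duplicate keys:
-- those cannot arise from a Python dict, and on them A's per-key first-match lookups and
-- B's whole-list pass may legitimately disagree.
def Pre_get_parking_status (place_details_response : List (String × List (String × Bool))) : Prop :=
  ∀ p ∈ place_details_response, (p.2.map Prod.fst).Nodup
instance (place_details_response : List (String × List (String × Bool))) : Decidable (Pre_get_parking_status place_details_response) := by unfold Pre_get_parking_status; infer_instance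

def pvWitness_get_parking_status : (List (String × List (String × Bool))) :=
  [("parkingOptions", [("freeParkingLot", false), ("valetParking", true)])]

def Spec_get_parking_status (place_details_response : List (String × List (String × Bool))) (out : String) : Prop := out = get_parking_status_alt place_details_response
instance (place_details_response : List (String × List (String × Bool))) (out : String) : Decidable (Spec_get_parking_status place_details_response out) := by unfold Spec_get_parking_status; infer_instance

-- ===== CLAIM (what is proved, stated in full; the proofs are below) =====
def Claim_equal_get_parking_status : Prop := ∀ (place_details_response : List (String × List (String × Bool))), Dom_get_parking_status place_details_response → Pre_get_parking_status place_details_response → Spec_get_parking_status place_details_response (get_parking_status place_details_response)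

-- ===== LEMMAS AND PROOFS =====

-- the value .get('parkingOptions', {}) returns is either the default or some member's value
theorem pv_getD_mk_mem (l : List (String × List (String × Bool))) (k : String)
    (d : List (String × Bool)) :
    PySem.Dict.getD (PySem.Dict.mk l) k d = d ∨
      ∃ p ∈ l, PySem.Dict.getD (PySem.Dict.mk l) k d = p.2 := by
  induction l with
  | nil => left; rfl
  | cons hd tl ih =>
    rw [PySem.Dict.getD_eq_get?_getD, PySem.Dict.get?_mk_cons]
    by_cases h : hd.1 == k
    · right; exact ⟨hd, by simp, by simp [h]⟩
    · simp only [h, Bool.false_eq_true, if_false]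
      rw [← PySem.Dict.getD_eq_get?_getD]
      rcases ih with h' | ⟨p, hp, hv⟩
      · left; exact h'
      · right; exact ⟨p, List.mem_cons_of_mem _ hp, hv⟩

-- fold of B's step function computed as two any-scans
theorem pv_fold_spec (f g : String → Bool) (opts : List (String × Bool)) (a b : Bool) :
    opts.foldl
      (fun (st : Bool × Bool) kv =>
        if kv.2 && f kv.1 then (true, st.2)
        else if kv.2 && g kv.1 then (st.1, true)
        else st)
      (a, b)
    = (a || opts.any (fun p => p.2 && f p.1),
       b || opts.any (fun p => p.2 && !f p.1 && g p.1)) := by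
  induction opts generalizing a b with
  | nil => simp
  | cons hd tl ih =>
    simp only [List.foldl_cons, List.any_cons]
    cases hv : hd.2 with
    | false =>
      simp only [Bool.false_and, Bool.false_eq_true, if_false, Bool.false_or]
      exact ih a b
    | true =>
      cases hf : f hd.1 with
      | true =>
        simp only [Bool.true_and, Bool.not_true, Bool.false_and, Bool.false_or, if_true]
        rw [ih]
        simp
      | false =>
        cases hg : g hd.1 with
        | true =>
          simp only [Bool.true_and, Bool.not_false, Bool.false_eq_true, if_false, if_true]
          rw [ih]
          simp
        | false =>
          simp only [Bool.true_and, Bool.false_eq_true, if_false, Bool.false_or]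
          exact ih a b

-- A's any-scan over a key list equals B's any-scan over the items, when keys are unique
theorem pv_any_keys (F : List String) (opts : List (String × Bool))
    (hnd : (opts.map Prod.fst).Nodup) :
    F.any (fun k => PySem.Dict.getD (PySem.Dict.mk opts) k false)
      = opts.any (fun p => p.2 && F.contains p.1) := by
  have hk : (PySem.Dict.mk opts).keys.Nodup := by simpa [PySem.Dict.keys_mk] using hnd
  rw [Bool.eq_iff_iff]
  simp only [List.any_eq_true]
  constructor
  · rintro ⟨k, hkF, hget⟩
    rw [PySem.Dict.getD_eq_get?_getD] at hget
    cases hq : PySem.Dict.get? (PySem.Dict.mk opts) k with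
    | none => rw [hq] at hget; simp at hget
    | some v =>
      rw [hq] at hget
      simp only [Option.getD_some] at hget
      subst hget
      have hmem : (k, true) ∈ (PySem.Dict.mk opts).items :=
        PySem.Dict.mem_items_of_get?_eq_some _ hq
      exact ⟨(k, true), hmem, by simp [hkF]⟩
  · rintro ⟨p, hp, hcond⟩
    simp only [Bool.and_eq_true] at hcond
    obtain ⟨hval, hc⟩ := hcond
    have hkF : p.1 ∈ F := by simpa using hc
    refine ⟨p.1, hkF, ?_⟩
    have hq : PySem.Dict.get? (PySem.Dict.mk opts) p.1 = some p.2 :=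
      PySem.Dict.get?_of_mem_items _ (by simpa using hp) hk
    rw [PySem.Dict.getD_eq_get?_getD, hq, Option.getD_some, hval]

-- paid literal keys are never free keys
theorem pv_paid_not_free (k : String)
    (h : k ∈ (["paidParkingLot", "paidStreetParking", "paidGarageParking", "valetParking"] : List String)) :
    (["freeParkingLot", "freeStreetParking", "freeGarageParking"] : List String).contains k = false := by
  fin_cases h <;> decide

-- ===== VERDICT (by name: the statement is the Claim_ definition above) =====
theorem get_parking_status_spec : Claim_equal_get_parking_status := by
  intro pdr _ hpre
  unfold Spec_get_parking_status get_parking_status get_parking_status_alt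
  set F : List String := ["freeParkingLot", "freeStreetParking", "freeGarageParking"] with hFdef
  set P : List String := ["paidParkingLot", "paidStreetParking", "paidGarageParking", "valetParking"] with hPdef
  have hFset : (PySem.Set.ofList F : List String) = F := by rw [hFdef]; decide
  have hPset : (PySem.Set.ofList P : List String) = P := by rw [hPdef]; decide
  have hsetc : ∀ (s : List String) (k : String), PySem.Set.contains s k = s.contains k :=
    fun _ _ => rfl
  have hnd : (((PySem.Dict.getD (PySem.Dict.mk pdr) "parkingOptions"
      ([] : List (String × Bool))).map Prod.fst)).Nodup := by
    rcases pv_getD_mk_mem pdr "parkingOptions" [] with h | ⟨p, hp, hv⟩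
    · rw [h]; simp
    · rw [hv]; exact hpre p hp
  set opts := PySem.Dict.getD (PySem.Dict.mk pdr) "parkingOptions" ([] : List (String × Bool)) with hopts
  simp only [hFset, hPset, hsetc]
  rw [pv_fold_spec (fun k => F.contains k) (fun k => P.contains k) opts false false]
  have hpaid : opts.any (fun p => p.2 && !F.contains p.1 && P.contains p.1)
      = opts.any (fun p => p.2 && P.contains p.1) := by
    apply List.any_congr rfl
    intro p
    cases hP' : P.contains p.1 with
    | false => simp
    | true =>
      have hF' : F.contains p.1 = false := by
        rw [hFdef]; exact pv_paid_not_free p.1 (by rw [hPdef] at hP'; simpa using hP')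
      rw [hF']
      simp
  rw [hpaid, ← pv_any_keys F opts hnd, ← pv_any_keys P opts hnd]
  all_goals simp
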